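-- pv_equiv track=rewrite | github.com/TayyabMuhammad5/AI-Project | 23i-0752_23i-0738_E/src/model_a_train_generation.py | detect_answer_type
-- ===== SOURCE A (Python) =====
-- def detect_answer_type(answer):
--     """Improved answer type detection with more categories."""
--     answer_lower = answer.lower().strip()
--     words = answer_lower.split()
--
--     # ── Count / Number answers → "How many" ──────────
--     count_words = {'once', 'twice', 'three', 'four', 'five', 'six',
--                    'seven', 'eight', 'nine', 'ten', 'one', 'two',
--                    'several', 'many', 'few', 'hundred', 'thousand',
--                    'dozen', 'none', 'both', 'all'}
--     if any(w in count_words for w in words):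
--         return 'How many'
--     # Pure digits like "3", "42"
--     if answer_lower.strip().isdigit():
--         return 'How many'
--
--     # ── Time answers → "When" ────────────────────────
--     time_words = {'monday','tuesday','wednesday','thursday','friday',
--                   'saturday','sunday','january','february','march',
--                   'april','may','june','july','august','september',
--                   'october','november','december','year','month',
--                   'day','week','hour','morning','evening','night',
--                   'today','yesterday','tomorrow','ago','later','time',
--                   'century','decade','period','date','season',
--                   'after','before','during','meanwhile','soon'}
--     if any(w in time_words for w in words):
--         return 'When'
--
--     # ── Place answers → "Where" ──────────────────────
--     place_words = {'school','city','country','street','road','house',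
--                    'building','park','hospital','market','store',
--                    'office','room','place','location','town','village',
--                    'restaurant','station','airport','museum','library',
--                    'home','here','there','area','region','beach',
--                    'forest','garden','hall','church','farm'}
--     if any(w in place_words for w in words):
--         return 'Where'
--
--     # ── Reason answers → "Why" ───────────────────────
--     reason_words = {'because','since','therefore','due','order',
--                     'reason','cause','result','effect','hence',
--                     'so that', 'in order'}
--     if any(w in reason_words for w in words):
--         return 'Why'
--
--     # ── Person answers → "Who" (only true person refs)─
--     # Note: 'student', 'teacher' etc. are ROLES, not persons
--     # Only use Who for actual names or pronouns
--     person_words = {'he','she','they','mr','mrs','dr','professor',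
--                     'father','mother','author','speaker'}
--     if any(w in person_words for w in words):
--         return 'Who'
--     # Single capitalized word that looks like a name
--     if len(words) == 1 and answer.strip()[0].isupper() and answer.strip().isalpha():
--         return 'Who'
--     # Multi-word with title case → probably a name
--     if len(words) >= 2 and all(w[0].isupper() for w in answer.strip().split() if w):
--         return 'Who'
--
--     # ── Manner answers → "How" ───────────────────────
--     manner_words = {'by','through','using','carefully','quickly',
--                     'slowly','happily','sadly','easily','hard'}
--     if any(w in manner_words for w in words):
--         return 'How'
--
--     return 'What'
-- ===== SOURCE B (Python) =====
-- # Different decomposition: one word->rank dictionary built once from space-joined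
-- # category strings, a single pass over the words taking the minimum rank, then a
-- # label table lookup (the two multi-word reason entries 'so that'/'in order' can
-- # never equal a whitespace-split token, so they are not in the table).
--
-- _SOURCES = [
--     (0, 'once twice three four five six seven eight nine ten one two '
--         'several many few hundred thousand dozen none both all'),
--     (2, 'monday tuesday wednesday thursday friday saturday sunday january '
--         'february march april may june july august september october november '
--         'december year month day week hour morning evening night today '
--         'yesterday tomorrow ago later time century decade period date season '
--         'after before during meanwhile soon'),
--     (3, 'school city country street road house building park hospital market '
--         'store office room place location town village restaurant station '
--         'airport museum library home here there area region beach forest '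
--         'garden hall church farm'),
--     (4, 'because since therefore due order reason cause result effect hence'),
--     (5, 'he she they mr mrs dr professor father mother author speaker'),
--     (7, 'by through using carefully quickly slowly happily sadly easily hard'),
-- ]
--
-- _RANK = {}
-- for _r, _s in _SOURCES:
--     for _w in _s.split():
--         _RANK[_w] = _r
--
-- # rank 1 = the digit test, rank 6 = the capitalisation tests, rank 8 = default
-- _LABELS = ['How many', 'How many', 'When', 'Where', 'Why', 'Who', 'Who', 'How', 'What']
--
--
-- def _first_upper(w):
--     return bool(w) and w[0].isupper()
--
--
-- def detect_answer_type(answer):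
--     """Improved answer type detection with more categories."""
--     answer_lower = answer.lower().strip()
--     words = answer_lower.split()
--     best = 8
--     for w in words:
--         best = min(best, _RANK.get(w, 8))
--     if answer_lower.isdigit():
--         best = min(best, 1)
--     if best > 5:
--         s = answer.strip()
--         if (len(words) == 1 and _first_upper(s) and s.isalpha()) or \
--            (len(words) >= 2 and all(_first_upper(w) for w in s.split() if w)):
--             best = 6
--     return _LABELS[best]
-- ===== Notes on version B (the rewrite author's own statement) =====
-- stated objective: alternative
-- what changed: Replaces the six per-category any(...) scans over the word list by one word-to-rank dictionary built once from space-joined category strings, a single pass taking the minimum rank per word, and a rank-to-label table with the digit and capitalisation tests slotted in at their original priorities.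
import Mathlib
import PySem

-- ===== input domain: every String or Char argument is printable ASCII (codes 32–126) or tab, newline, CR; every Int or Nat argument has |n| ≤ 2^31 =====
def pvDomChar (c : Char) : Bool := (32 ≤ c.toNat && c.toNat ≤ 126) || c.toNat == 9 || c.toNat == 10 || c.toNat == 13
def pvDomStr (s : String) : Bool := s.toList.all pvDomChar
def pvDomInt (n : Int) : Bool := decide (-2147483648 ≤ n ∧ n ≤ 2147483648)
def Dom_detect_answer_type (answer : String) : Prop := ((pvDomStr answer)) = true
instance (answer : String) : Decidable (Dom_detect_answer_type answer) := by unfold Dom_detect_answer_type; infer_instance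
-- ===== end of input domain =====

-- B builds one word→rank dictionary once from space-joined category strings, takes the
-- minimum rank in a single pass over the words and maps it through a rank→label table
-- (objective: alternative).

-- ===== PORT A =====
def count_words : List String := ["once", "twice", "three", "four", "five", "six",
  "seven", "eight", "nine", "ten", "one", "two", "several", "many", "few",
  "hundred", "thousand", "dozen", "none", "both", "all"]
def time_words : List String := ["monday","tuesday","wednesday","thursday","friday",
  "saturday","sunday","january","february","march","april","may","june","july",
  "august","september","october","november","december","year","month","day","week",
  "hour","morning","evening","night","today","yesterday","tomorrow","ago","later",
  "time","century","decade","period","date","season","after","before","during",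
  "meanwhile","soon"]
def place_words : List String := ["school","city","country","street","road","house",
  "building","park","hospital","market","store","office","room","place","location",
  "town","village","restaurant","station","airport","museum","library","home","here",
  "there","area","region","beach","forest","garden","hall","church","farm"]
def reason_words : List String := ["because","since","therefore","due","order",
  "reason","cause","result","effect","hence","so that","in order"]
def person_words : List String := ["he","she","they","mr","mrs","dr","professor",
  "father","mother","author","speaker"]
def manner_words : List String := ["by","through","using","carefully","quickly",
  "slowly","happily","sadly","easily","hard"]

-- `answer.strip()[0].isupper()` under a guard that makes the index in range
-- (so the `.getD false` branch is unreachable)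
def pvHeadUpper (s : String) : Bool :=
  ((PySem.Str.pyGet? s 0).map PySem.Chars.isupper).getD false

def detect_answer_type (answer : String) : String :=
  let answer_lower := PySem.Str.strip (PySem.Str.lower answer)
  let words := PySem.Str.split₀ answer_lower
  if words.any (fun w => count_words.contains w) then "How many"
  else if PySem.Str.strIsdigit (PySem.Str.strip answer_lower) then "How many"
  else if words.any (fun w => time_words.contains w) then "When"
  else if words.any (fun w => place_words.contains w) then "Where"
  else if words.any (fun w => reason_words.contains w) then "Why"
  else if words.any (fun w => person_words.contains w) then "Who"
  else if words.length == 1 && pvHeadUpper (PySem.Str.strip answer)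
          && PySem.Str.strIsalpha (PySem.Str.strip answer) then "Who"
  else if decide (2 ≤ words.length)
          && ((PySem.Str.split₀ (PySem.Str.strip answer)).filter (fun w => !(w == ""))).all
               (fun w => pvHeadUpper w) then "Who"
  else if words.any (fun w => manner_words.contains w) then "How"
  else "What"

-- ===== PORT B =====
-- the module-level _SOURCES / _RANK / _LABELS of Source B
def pvSources : List (Nat × String) := [
  (0, "once twice three four five six seven eight nine ten one two several many few hundred thousand dozen none both all"),
  (2, "monday tuesday wednesday thursday friday saturday sunday january february march april may june july august september october november december year month day week hour morning evening night today yesterday tomorrow ago later time century decade period date season after before during meanwhile soon"),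
  (3, "school city country street road house building park hospital market store office room place location town village restaurant station airport museum library home here there area region beach forest garden hall church farm"),
  (4, "because since therefore due order reason cause result effect hence"),
  (5, "he she they mr mrs dr professor father mother author speaker"),
  (7, "by through using carefully quickly slowly happily sadly easily hard")]

def pvRankTbl : PySem.Dict String Nat :=
  pvSources.foldl
    (fun d p => (PySem.Str.split₀ p.2).foldl (fun d w => PySem.Dict.insert d w p.1) d)
    PySem.Dict.empty

def pvLabels : List String :=
  ["How many", "How many", "When", "Where", "Why", "Who", "Who", "How", "What"]

-- Source B's `_first_upper(w)` = `bool(w) and w[0].isupper()`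
def pvFirstUpper (w : String) : Bool :=
  match w.toList with
  | [] => false
  | c :: _ => PySem.Chars.isupper c

def detect_answer_type_alt (answer : String) : String :=
  let answer_lower := PySem.Str.strip (PySem.Str.lower answer)
  let words := PySem.Str.split₀ answer_lower
  let best := words.foldl (fun b w => min b (PySem.Dict.getD pvRankTbl w 8)) 8
  let best := if PySem.Str.strIsdigit answer_lower then min best 1 else best
  let best :=
    if 5 < best then
      let s := PySem.Str.strip answer
      if (words.length == 1 && pvFirstUpper s && PySem.Str.strIsalpha s)
         || (decide (2 ≤ words.length)
             && ((PySem.Str.split₀ s).filter (fun w => !(w == ""))).all pvFirstUpper)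
      then 6 else best
    else best
  -- `_LABELS[best]` with 0 ≤ best ≤ 8 always in range
  pvLabels.getD best ""

-- ===== PRECONDITION & SPEC =====
def Spec_detect_answer_type (answer : String) (out : String) : Prop := out = detect_answer_type_alt answer
instance (answer : String) (out : String) : Decidable (Spec_detect_answer_type answer out) := by unfold Spec_detect_answer_type; infer_instance

-- ===== CLAIM (what is proved, stated in full; the proofs are below) =====
def Claim_equal_detect_answer_type : Prop := ∀ (answer : String), Dom_detect_answer_type answer → Spec_detect_answer_type answer (detect_answer_type answer)

-- ===== LEMMAS AND PROOFS =====

-- the items of the rank table, written out (proved equal to pvRankTbl below)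
def pvTblItems : List (String × Nat) := [("once", 0), ("twice", 0), ("three", 0), ("four", 0), ("five", 0), ("six", 0), ("seven", 0), ("eight", 0), ("nine", 0), ("ten", 0), ("one", 0), ("two", 0), ("several", 0), ("many", 0), ("few", 0), ("hundred", 0), ("thousand", 0), ("dozen", 0), ("none", 0), ("both", 0), ("all", 0), ("monday", 2), ("tuesday", 2), ("wednesday", 2), ("thursday", 2), ("friday", 2), ("saturday", 2), ("sunday", 2), ("january", 2), ("february", 2), ("march", 2), ("april", 2), ("may", 2), ("june", 2), ("july", 2), ("august", 2), ("september", 2), ("october", 2), ("november", 2), ("december", 2), ("year", 2), ("month", 2), ("day", 2), ("week", 2), ("hour", 2), ("morning", 2), ("evening", 2), ("night", 2), ("today", 2), ("yesterday", 2), ("tomorrow", 2), ("ago", 2), ("later", 2), ("time", 2), ("century", 2), ("decade", 2), ("period", 2), ("date", 2), ("season", 2), ("after", 2), ("before", 2), ("during", 2), ("meanwhile", 2), ("soon", 2), ("school", 3), ("city", 3), ("country", 3), ("street", 3), ("road", 3), ("house", 3), ("building", 3), ("park", 3), ("hospital", 3), ("market", 3), ("store", 3), ("office", 3), ("room", 3),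 ("place", 3), ("location", 3), ("town", 3), ("village", 3), ("restaurant", 3), ("station", 3), ("airport", 3), ("museum", 3), ("library", 3), ("home", 3), ("here", 3), ("there", 3), ("area", 3), ("region", 3), ("beach", 3), ("forest", 3), ("garden", 3), ("hall", 3), ("church", 3), ("farm", 3), ("because", 4), ("since", 4), ("therefore", 4), ("due", 4), ("order", 4), ("reason", 4), ("cause", 4), ("result", 4), ("effect", 4), ("hence", 4), ("he", 5), ("she", 5), ("they", 5), ("mr", 5), ("mrs", 5), ("dr", 5), ("professor", 5), ("father", 5), ("mother", 5), ("author", 5), ("speaker", 5), ("by", 7), ("through", 7), ("using", 7), ("carefully", 7), ("quickly", 7), ("slowly", 7), ("happily", 7), ("sadly", 7), ("easily", 7), ("hard", 7)]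

-- A's membership if-chain: the specification the table lookup is proved to satisfy
def pvRankSpec (w : String) : Nat :=
  if count_words.contains w then 0
  else if time_words.contains w then 2
  else if place_words.contains w then 3
  else if reason_words.contains w then 4
  else if person_words.contains w then 5
  else if manner_words.contains w then 7
  else 8

set_option maxHeartbeats 4000000 in
set_option maxRecDepth 100000 in
lemma tbl_eq : pvRankTbl = PySem.Dict.mk pvTblItems := by decide

set_option maxHeartbeats 4000000 in
set_option maxRecDepth 100000 in
lemma tbl_nodup : (PySem.Dict.mk pvTblItems).keys.Nodup := by decide

set_option maxHeartbeats 4000000 in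
set_option maxRecDepth 100000 in
lemma tbl_mem :
    (∀ x ∈ count_words, (x, 0) ∈ (PySem.Dict.mk pvTblItems).items)
    ∧ (∀ x ∈ time_words, (x, 2) ∈ (PySem.Dict.mk pvTblItems).items)
    ∧ (∀ x ∈ place_words, (x, 3) ∈ (PySem.Dict.mk pvTblItems).items)
    ∧ (∀ x ∈ reason_words, x ≠ "so that" → x ≠ "in order" → (x, 4) ∈ (PySem.Dict.mk pvTblItems).items)
    ∧ (∀ x ∈ person_words, (x, 5) ∈ (PySem.Dict.mk pvTblItems).items)
    ∧ (∀ x ∈ manner_words, (x, 7) ∈ (PySem.Dict.mk pvTblItems).items) := by decide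

set_option maxHeartbeats 4000000 in
set_option maxRecDepth 100000 in
lemma tbl_keys_sub : ∀ k ∈ (PySem.Dict.mk pvTblItems).keys,
    count_words.contains k ∨ time_words.contains k ∨ place_words.contains k
    ∨ reason_words.contains k ∨ person_words.contains k ∨ manner_words.contains k := by decide

-- tokens produced by `.split()` contain no whitespace character
lemma split₀_go_nospace (s cur : List Char) (acc : List (List Char))
    (hcur : cur.all (fun c => !PySem.Chars.isspace c) = true)
    (hacc : ∀ t ∈ acc, t.all (fun c => !PySem.Chars.isspace c) = true) :
    ∀ t ∈ PySem.Chars.split₀.go s cur acc, t.all (fun c => !PySem.Chars.isspace c) = true := by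
  induction s generalizing cur acc with
  | nil =>
    intro t ht
    rw [PySem.Chars.split₀.go] at ht
    split_ifs at ht <;> rw [List.mem_reverse] at ht
    · exact hacc t ht
    · rcases List.mem_cons.mp ht with rfl | h
      · simpa using hcur
      · exact hacc t h
  | cons c rest ih =>
    intro t ht
    rw [PySem.Chars.split₀.go] at ht
    split_ifs at ht with h1 h2
    · exact ih [] acc (by simp) hacc t ht
    · refine ih [] (cur.reverse :: acc) (by simp) ?_ t ht
      intro u hu
      rcases List.mem_cons.mp hu with rfl | h
      · simpa using hcur
      · exact hacc u h
    · refine ih (c :: cur) acc ?_ hacc t ht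
      simp only [List.all_cons, hcur, Bool.and_true]
      simp [h1]

lemma tokens_nospace (s : String) :
    ∀ w ∈ PySem.Str.split₀ s, w.toList.all (fun c => !PySem.Chars.isspace c) = true := by
  intro w hw
  unfold PySem.Str.split₀ PySem.Chars.split₀ at hw
  rcases List.mem_map.mp hw with ⟨t, ht, rfl⟩
  have := split₀_go_nospace s.toList [] [] (by simp) (by simp) t ht
  simpa using this

-- the dictionary lookup agrees with A's membership chain on every whitespace-free word
lemma rank_eq (w : String) (hs : w.toList.all (fun c => !PySem.Chars.isspace c) = true) :
    PySem.Dict.getD pvRankTbl w 8 = pvRankSpec w := by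
  obtain ⟨m0, m2, m3, m4, m5, m7⟩ := tbl_mem
  rw [tbl_eq]
  unfold pvRankSpec
  split_ifs with h0 h1 h2 h3 h4 h5
  · exact PySem.Dict.getD_of_mem_items _ (m0 w (by simpa using h0)) tbl_nodup 8
  · exact PySem.Dict.getD_of_mem_items _ (m2 w (by simpa using h1)) tbl_nodup 8
  · exact PySem.Dict.getD_of_mem_items _ (m3 w (by simpa using h2)) tbl_nodup 8
  · refine PySem.Dict.getD_of_mem_items _ (m4 w (by simpa using h3) ?_ ?_) tbl_nodup 8
    · rintro rfl; exact absurd hs (by decide)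
    · rintro rfl; exact absurd hs (by decide)
  · exact PySem.Dict.getD_of_mem_items _ (m5 w (by simpa using h4)) tbl_nodup 8
  · exact PySem.Dict.getD_of_mem_items _ (m7 w (by simpa using h5)) tbl_nodup 8
  · refine PySem.Dict.getD_of_not_contains _ 8 ?_
    rw [PySem.Dict.contains_eq_decide_mem_keys]
    simp only [decide_eq_false_iff_not]
    intro hk
    rcases tbl_keys_sub w hk with h | h | h | h | h | h <;> simp_all

-- A's head test equals Source B's _first_upper (both read the first character, if any)
lemma pvHeadUpper_eq (s : String) : pvHeadUpper s = pvFirstUpper s := by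
  unfold pvHeadUpper pvFirstUpper
  rcases h : s.toList with _ | ⟨c, t⟩ <;>
    simp [PySem.Str.pyGet?, PySem.Chars.pyGet?, PySem.List.pyGet?, PySem.List.pyIdx?, h]

-- `.strip()` is idempotent (A strips `answer_lower` a second time; B does not)
lemma chars_strip_idem (l : List Char) :
    PySem.Chars.strip (PySem.Chars.strip l) = PySem.Chars.strip l := by
  unfold PySem.Chars.strip PySem.Chars.lstrip PySem.Chars.rstrip
  set p := PySem.Chars.isspace
  set y := List.dropWhile p l with hy
  have hpre : (List.dropWhile p y.reverse).reverse <+: y := by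
    have h := (List.dropWhile_suffix (l := y.reverse) p).reverse
    simpa using h
  have hdrop : List.dropWhile p ((List.dropWhile p y.reverse).reverse)
      = (List.dropWhile p y.reverse).reverse := by
    cases hr : (List.dropWhile p y.reverse).reverse with
    | nil => simp
    | cons a t =>
      obtain ⟨u, hu⟩ := hpre
      rw [hr] at hu
      have h2 : List.dropWhile p l = a :: (t ++ u) := by
        rw [← hy, ← hu]; simp
      have hyne : List.dropWhile p l ≠ [] := by rw [h2]; simp
      have hpa : p a = false := by
        have := List.head_dropWhile_not p hyne
        simpa [h2] using this
      simp [hpa]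
  rw [hdrop, List.reverse_reverse, List.dropWhile_idempotent]

lemma str_strip_idem (s : String) :
    PySem.Str.strip (PySem.Str.strip s) = PySem.Str.strip s := by
  simp [PySem.Str.strip, chars_strip_idem]

lemma foldMin_le (f : String → Nat) (ws : List String) (b k : Nat) :
    ws.foldl (fun a w => min a (f w)) b ≤ k ↔ b ≤ k ∨ ∃ w ∈ ws, f w ≤ k := by
  induction ws generalizing b with
  | nil => simp
  | cons x t ih =>
    simp only [List.foldl_cons, ih, min_le_iff, List.mem_cons]
    constructor
    · rintro (⟨h | h⟩ | ⟨w, hw, h⟩)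
      · exact Or.inl h
      · exact Or.inr ⟨x, Or.inl rfl, h⟩
      · exact Or.inr ⟨w, Or.inr hw, h⟩
    · rintro (h | ⟨w, (rfl | hw), h⟩)
      · exact Or.inl (Or.inl h)
      · exact Or.inl (Or.inr h)
      · exact Or.inr ⟨w, hw, h⟩

lemma foldMin_cases (f : String → Nat) (ws : List String) (b : Nat) :
    ws.foldl (fun a w => min a (f w)) b = b ∨
      ∃ w ∈ ws, ws.foldl (fun a w => min a (f w)) b = f w := by
  induction ws generalizing b with
  | nil => simp
  | cons x t ih =>
    simp only [List.foldl_cons]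
    rcases ih (min b (f x)) with h | ⟨w, hw, h⟩
    · rcases le_total b (f x) with hbf | hbf
      · exact Or.inl (by rw [h, min_eq_left hbf])
      · exact Or.inr ⟨x, List.mem_cons_self, by rw [h, min_eq_right hbf]⟩
    · exact Or.inr ⟨w, List.mem_cons_of_mem _ hw, h⟩

lemma foldMin_ge (f : String → Nat) (ws : List String) (b k : Nat)
    (h : ∀ w ∈ ws, k ≤ f w) (hb : k ≤ b) :
    k ≤ ws.foldl (fun a w => min a (f w)) b := by
  rcases foldMin_cases f ws b with h1 | ⟨w, hw, h1⟩
  · omega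
  · rw [h1]; exact h w hw

-- the one-pass minimum over the table equals the rank of the first category A's scans hit
-- (stated for an arbitrary token list with whitespace-free tokens; best_eq' specialises
-- it to `.split()` output)
lemma best_eq (ws : List String)
    (hws : ∀ w ∈ ws, w.toList.all (fun c => !PySem.Chars.isspace c) = true) :
    ws.foldl (fun b w => min b (PySem.Dict.getD pvRankTbl w 8)) 8 =
    if ws.any (fun w => count_words.contains w) then 0
    else if ws.any (fun w => time_words.contains w) then 2
    else if ws.any (fun w => place_words.contains w) then 3
    else if ws.any (fun w => reason_words.contains w) then 4
    else if ws.any (fun w => person_words.contains w) then 5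
    else if ws.any (fun w => manner_words.contains w) then 7
    else 8 := by
  rw [PySem.List.foldl_congr_mem ws _ (fun b w => min b (pvRankSpec w)) 8
    (fun b w hw => by rw [rank_eq w (hws w hw)])]
  split_ifs with h0 h1 h2 h3 h4 h5
  all_goals simp only [List.any_eq_true, not_exists, not_and] at *
  · obtain ⟨w, hw, hc⟩ := h0
    have hle := (foldMin_le pvRankSpec ws 8 0).mpr
      (Or.inr ⟨w, hw, by unfold pvRankSpec; split_ifs <;> first | omega | simp_all⟩)
    omega
  · obtain ⟨w, hw, hc⟩ := h1
    have hle := (foldMin_le pvRankSpec ws 8 2).mpr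
      (Or.inr ⟨w, hw, by unfold pvRankSpec; split_ifs <;> first | omega | simp_all⟩)
    have hge := foldMin_ge pvRankSpec ws 8 2
      (fun v hv => by
        have a0 := h0 v hv
        unfold pvRankSpec; split_ifs <;> first | omega | simp_all)
      (by omega)
    omega
  · obtain ⟨w, hw, hc⟩ := h2
    have hle := (foldMin_le pvRankSpec ws 8 3).mpr
      (Or.inr ⟨w, hw, by unfold pvRankSpec; split_ifs <;> first | omega | simp_all⟩)
    have hge := foldMin_ge pvRankSpec ws 8 3
      (fun v hv => by
        have a0 := h0 v hv
        have a1 := h1 v hv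
        unfold pvRankSpec; split_ifs <;> first | omega | simp_all)
      (by omega)
    omega
  · obtain ⟨w, hw, hc⟩ := h3
    have hle := (foldMin_le pvRankSpec ws 8 4).mpr
      (Or.inr ⟨w, hw, by unfold pvRankSpec; split_ifs <;> first | omega | simp_all⟩)
    have hge := foldMin_ge pvRankSpec ws 8 4
      (fun v hv => by
        have a0 := h0 v hv
        have a1 := h1 v hv
        have a2 := h2 v hv
        unfold pvRankSpec; split_ifs <;> first | omega | simp_all)
      (by omega)
    omega
  · obtain ⟨w, hw, hc⟩ := h4
    have hle := (foldMin_le pvRankSpec ws 8 5).mpr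
      (Or.inr ⟨w, hw, by unfold pvRankSpec; split_ifs <;> first | omega | simp_all⟩)
    have hge := foldMin_ge pvRankSpec ws 8 5
      (fun v hv => by
        have a0 := h0 v hv
        have a1 := h1 v hv
        have a2 := h2 v hv
        have a3 := h3 v hv
        unfold pvRankSpec; split_ifs <;> first | omega | simp_all)
      (by omega)
    omega
  · obtain ⟨w, hw, hc⟩ := h5
    have hle := (foldMin_le pvRankSpec ws 8 7).mpr
      (Or.inr ⟨w, hw, by unfold pvRankSpec; split_ifs <;> first | omega | simp_all⟩)
    have hge := foldMin_ge pvRankSpec ws 8 7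
      (fun v hv => by
        have a0 := h0 v hv
        have a1 := h1 v hv
        have a2 := h2 v hv
        have a3 := h3 v hv
        have a4 := h4 v hv
        unfold pvRankSpec; split_ifs <;> first | omega | simp_all)
      (by omega)
    omega
  · rcases foldMin_cases pvRankSpec ws 8 with h | ⟨w, hw, h⟩
    · exact h
    · rw [h]
      have a0 := h0 w hw; have a1 := h1 w hw; have a2 := h2 w hw
      have a3 := h3 w hw; have a4 := h4 w hw; have a5 := h5 w hw
      unfold pvRankSpec; split_ifs <;> first | rfl | simp_all

lemma best_eq' (s : String) :
    (PySem.Str.split₀ s).foldl (fun b w => min b (PySem.Dict.getD pvRankTbl w 8)) 8 =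
    if (PySem.Str.split₀ s).any (fun w => count_words.contains w) then 0
    else if (PySem.Str.split₀ s).any (fun w => time_words.contains w) then 2
    else if (PySem.Str.split₀ s).any (fun w => place_words.contains w) then 3
    else if (PySem.Str.split₀ s).any (fun w => reason_words.contains w) then 4
    else if (PySem.Str.split₀ s).any (fun w => person_words.contains w) then 5
    else if (PySem.Str.split₀ s).any (fun w => manner_words.contains w) then 7
    else 8 := best_eq _ (tokens_nospace s)

-- ===== VERDICT (by name: the statement is the Claim_ definition above) =====
set_option maxHeartbeats 2000000 in
theorem detect_answer_type_spec : Claim_equal_detect_answer_type := by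
  intro answer _
  unfold Spec_detect_answer_type
  simp only [detect_answer_type, detect_answer_type_alt, str_strip_idem, pvHeadUpper_eq, best_eq']
  split_ifs <;> (try simp_all [pvLabels])
  all_goals
    rcases ‹((_ ∧ _) ∧ _) ∨ (_ ∧ _)› with ⟨⟨hl, hu⟩, ha⟩ | ⟨hl2, hall⟩
  · simp_all
  · obtain ⟨x, hx, hne, hfu⟩ := ‹_ → ∃ x, _› hl2
    rcases hall x hx with h' | h'
    · exact hne h'
    · simp [h'] at hfu
  · simp_all
  · obtain ⟨x, hx, hne, hfu⟩ := ‹_ → ∃ x, _› hl2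
    rcases hall x hx with h' | h'
    · exact hne h'
    · simp [h'] at hfu
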